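-- pv_equiv track=rewrite | github.com/dzautner/megacity | scripts/llm_player.py | compute_buildable_area
-- ===== SOURCE A (Python) =====
-- def compute_buildable_area(grid_lines: list) -> str:
--     """Find safe buildable area from parsed overview grid lines."""
--     if not grid_lines:
--         return ""
--
--     # Find bounds of buildable (non-water) cells
--     min_x, min_y = 999, 999
--     max_x, max_y = 0, 0
--     for y, row in enumerate(grid_lines):
--         for x, ch in enumerate(row):
--             if ch != '~' and ch != ' ':  # Not water or padding
--                 min_x = min(min_x, x)
--                 max_x = max(max_x, x)
--                 min_y = min(min_y, y)
--                 max_y = max(max_y, y)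
--     if min_x > max_x:
--         return ""
--     # Scale from overview coords (64x64) to grid coords (256x256)
--     scale = 4
--     gx0, gy0 = min_x * scale, min_y * scale
--     gx1, gy1 = (max_x + 1) * scale - 1, (max_y + 1) * scale - 1
--     # Clamp to grid bounds
--     gx0 = max(0, min(gx0, 255))
--     gy0 = max(0, min(gy0, 255))
--     gx1 = max(0, min(gx1, 255))
--     gy1 = max(0, min(gy1, 255))
--     # Find a safe center point (well away from water edges)
--     margin = 5 * scale  # 5 overview cells = 20 grid cells margin
--     sx0, sy0 = gx0 + margin, gy0 + margin
--     sx1, sy1 = gx1 - margin, gy1 - margin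
--     cx, cy = (sx0 + sx1) // 2, (sy0 + sy1) // 2
--     # Cap center to safe range
--     cx = max(sx0, min(cx, sx1))
--     cy = max(sy0, min(cy, sy1))
--     return (f"Buildable land: ({sx0},{sy0}) to ({sx1},{sy1}). Center: ({cx},{cy}). "
--             f"Build roads starting near the center. "
--             f"NOTE: Rivers/lakes exist INSIDE this area — if you hit water, try a different direction.")
-- ===== SOURCE B (Python) =====
-- def _format_area(min_x, max_x, min_y, max_y):
--     # Scale from overview coords (64x64) to grid coords (256x256), clamp, center.
--     scale = 4
--     gx0, gy0 = min_x * scale, min_y * scale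
--     gx1, gy1 = (max_x + 1) * scale - 1, (max_y + 1) * scale - 1
--     gx0 = max(0, min(gx0, 255))
--     gy0 = max(0, min(gy0, 255))
--     gx1 = max(0, min(gx1, 255))
--     gy1 = max(0, min(gy1, 255))
--     margin = 5 * scale
--     sx0, sy0 = gx0 + margin, gy0 + margin
--     sx1, sy1 = gx1 - margin, gy1 - margin
--     cx, cy = (sx0 + sx1) // 2, (sy0 + sy1) // 2
--     cx = max(sx0, min(cx, sx1))
--     cy = max(sy0, min(cy, sy1))
--     return (f"Buildable land: ({sx0},{sy0}) to ({sx1},{sy1}). Center: ({cx},{cy}). "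
--             f"Build roads starting near the center. "
--             f"NOTE: Rivers/lakes exist INSIDE this area — if you hit water, try a different direction.")
--
--
-- def compute_buildable_area(grid_lines: list) -> str:
--     """Find safe buildable area from parsed overview grid lines."""
--     # Collect the coordinates of every buildable (non-water, non-padding) cell,
--     # then reduce with min/max — instead of A's running min/max accumulation.
--     pts = [(x, y)
--            for y, row in enumerate(grid_lines)
--            for x, ch in enumerate(row)
--            if ch != '~' and ch != ' ']
--     if not pts:
--         return ""
--     xs = [p[0] for p in pts]
--     ys = [p[1] for p in pts]
--     return _format_area(min(xs), max(xs), min(ys), max(ys))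
-- ===== Notes on version B (the rewrite author's own statement) =====
-- stated objective: alternative
-- what changed: Replaces A's single-pass running min/max accumulation with 999/0 sentinel initial values by a collect-then-reduce decomposition: build the list of buildable-cell coordinates, return "" if it is empty, then take min/max of the coordinate lists and format; the [0,255] clamping makes A's 999 sentinel observationally harmless, so results agree on all inputs.
import Mathlib
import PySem

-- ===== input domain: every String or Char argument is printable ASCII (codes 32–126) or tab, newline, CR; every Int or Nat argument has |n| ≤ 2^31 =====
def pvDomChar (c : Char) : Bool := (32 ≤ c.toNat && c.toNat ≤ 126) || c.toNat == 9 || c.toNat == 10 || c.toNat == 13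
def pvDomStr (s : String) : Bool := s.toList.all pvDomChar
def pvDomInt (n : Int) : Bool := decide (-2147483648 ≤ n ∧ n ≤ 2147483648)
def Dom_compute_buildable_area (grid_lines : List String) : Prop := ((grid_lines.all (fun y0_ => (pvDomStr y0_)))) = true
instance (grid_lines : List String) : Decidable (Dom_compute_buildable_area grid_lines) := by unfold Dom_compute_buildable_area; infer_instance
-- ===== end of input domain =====

-- B replaces A's running min/max accumulation (999/0 sentinels) with a collect-then-reduce
-- decomposition (list of buildable-cell coordinates, then min/max); same cost, same results.


-- ===== PORT A =====
-- inner 'for x, ch in enumerate(row)' loop, state (min_x, max_x, min_y, max_y)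
def pvARow (y : Int) (x : Int) (cs : List Char) (st : Int × Int × Int × Int) : Int × Int × Int × Int :=
  match cs with
  | [] => st
  | c :: rest =>
    let st' := if c ≠ '~' ∧ c ≠ ' ' then
        (min st.1 x, max st.2.1 x, min st.2.2.1 y, max st.2.2.2 y)
      else st
    pvARow y (x + 1) rest st'

-- outer 'for y, row in enumerate(grid_lines)' loop
def pvARows (y : Int) (rows : List String) (st : Int × Int × Int × Int) : Int × Int × Int × Int :=
  match rows with
  | [] => st
  | r :: rest => pvARows (y + 1) rest (pvARow y 0 r.toList st)

-- A's tail: scaling, clamping, center and the f-string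
def pvAFmt (min_x max_x min_y max_y : Int) : String :=
  let scale : Int := 4
  let gx0 := min_x * scale
  let gy0 := min_y * scale
  let gx1 := (max_x + 1) * scale - 1
  let gy1 := (max_y + 1) * scale - 1
  let gx0 := max 0 (min gx0 255)
  let gy0 := max 0 (min gy0 255)
  let gx1 := max 0 (min gx1 255)
  let gy1 := max 0 (min gy1 255)
  let margin := 5 * scale
  let sx0 := gx0 + margin
  let sy0 := gy0 + margin
  let sx1 := gx1 - margin
  let sy1 := gy1 - margin
  let cx := PySem.Int.floordiv (sx0 + sx1) 2
  let cy := PySem.Int.floordiv (sy0 + sy1) 2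
  let cx := max sx0 (min cx sx1)
  let cy := max sy0 (min cy sy1)
  "Buildable land: (" ++ PySem.Int.toStr sx0 ++ "," ++ PySem.Int.toStr sy0 ++ ") to ("
    ++ PySem.Int.toStr sx1 ++ "," ++ PySem.Int.toStr sy1 ++ "). Center: ("
    ++ PySem.Int.toStr cx ++ "," ++ PySem.Int.toStr cy ++ "). "
    ++ "Build roads starting near the center. "
    ++ "NOTE: Rivers/lakes exist INSIDE this area — if you hit water, try a different direction."

def compute_buildable_area (grid_lines : List String) : String :=
  if grid_lines = [] then ""
  else
    let st := pvARows 0 grid_lines (999, 0, 999, 0)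
    if st.1 > st.2.1 then ""
    else pvAFmt st.1 st.2.1 st.2.2.1 st.2.2.2

-- ===== PORT B =====
-- port of _format_area (verbatim the same arithmetic and f-string as A's tail)
def pvBFmt (min_x max_x min_y max_y : Int) : String :=
  let scale : Int := 4
  let gx0 := min_x * scale
  let gy0 := min_y * scale
  let gx1 := (max_x + 1) * scale - 1
  let gy1 := (max_y + 1) * scale - 1
  let gx0 := max 0 (min gx0 255)
  let gy0 := max 0 (min gy0 255)
  let gx1 := max 0 (min gx1 255)
  let gy1 := max 0 (min gy1 255)
  let margin := 5 * scale
  let sx0 := gx0 + margin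
  let sy0 := gy0 + margin
  let sx1 := gx1 - margin
  let sy1 := gy1 - margin
  let cx := PySem.Int.floordiv (sx0 + sx1) 2
  let cy := PySem.Int.floordiv (sy0 + sy1) 2
  let cx := max sx0 (min cx sx1)
  let cy := max sy0 (min cy sy1)
  "Buildable land: (" ++ PySem.Int.toStr sx0 ++ "," ++ PySem.Int.toStr sy0 ++ ") to ("
    ++ PySem.Int.toStr sx1 ++ "," ++ PySem.Int.toStr sy1 ++ "). Center: ("
    ++ PySem.Int.toStr cx ++ "," ++ PySem.Int.toStr cy ++ "). "
    ++ "Build roads starting near the center. "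
    ++ "NOTE: Rivers/lakes exist INSIDE this area — if you hit water, try a different direction."

-- the comprehension: buildable coordinates of one row (x runs over enumerate(row))
def pvBRow (y : Int) (x : Int) (cs : List Char) : List (Int × Int) :=
  match cs with
  | [] => []
  | c :: rest =>
    if c ≠ '~' ∧ c ≠ ' ' then (x, y) :: pvBRow y (x + 1) rest
    else pvBRow y (x + 1) rest

-- all rows (y runs over enumerate(grid_lines))
def pvBPts (y : Int) (rows : List String) : List (Int × Int) :=
  match rows with
  | [] => []
  | r :: rest => pvBRow y 0 r.toList ++ pvBPts (y + 1) rest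

def compute_buildable_area_alt (grid_lines : List String) : String :=
  match pvBPts 0 grid_lines with
  | [] => ""
  | p :: ps =>
    -- min/max of a nonempty Python list = fold over the tail from the head
    let min_x := (ps.map Prod.fst).foldl min p.1
    let max_x := (ps.map Prod.fst).foldl max p.1
    let min_y := (ps.map Prod.snd).foldl min p.2
    let max_y := (ps.map Prod.snd).foldl max p.2
    pvBFmt min_x max_x min_y max_y

-- ===== PRECONDITION & SPEC =====
def Spec_compute_buildable_area (grid_lines : List String) (out : String) : Prop := out = compute_buildable_area_alt grid_lines
instance (grid_lines : List String) (out : String) : Decidable (Spec_compute_buildable_area grid_lines out) := by unfold Spec_compute_buildable_area; infer_instance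

-- ===== CLAIM (what is proved, stated in full; the proofs are below) =====
def Claim_equal_compute_buildable_area : Prop := ∀ (grid_lines : List String), Dom_compute_buildable_area grid_lines → Spec_compute_buildable_area grid_lines (compute_buildable_area grid_lines)

-- ===== LEMMAS AND PROOFS =====

-- A's loop body as a step function on the 4-tuple state
def pvUpd (st : Int × Int × Int × Int) (q : Int × Int) : Int × Int × Int × Int :=
  (min st.1 q.1, max st.2.1 q.1, min st.2.2.1 q.2, max st.2.2.2 q.2)

lemma pvARow_fold (cs : List Char) : ∀ (y x : Int) (st : Int × Int × Int × Int),
    pvARow y x cs st = (pvBRow y x cs).foldl pvUpd st := by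
  induction cs with
  | nil => intro y x st; rfl
  | cons c rest ih =>
    intro y x st
    by_cases h : c ≠ '~' ∧ c ≠ ' ' <;>
      simp [pvARow, pvBRow, h, ih, pvUpd]

lemma pvARows_fold (rows : List String) : ∀ (y : Int) (st : Int × Int × Int × Int),
    pvARows y rows st = (pvBPts y rows).foldl pvUpd st := by
  induction rows with
  | nil => intro y st; rfl
  | cons r rest ih =>
    intro y st
    simp [pvARows, pvBPts, List.foldl_append, pvARow_fold, ih]

lemma pvUpd_components (l : List (Int × Int)) : ∀ (st : Int × Int × Int × Int),
    l.foldl pvUpd st =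
      ((l.map Prod.fst).foldl min st.1, (l.map Prod.fst).foldl max st.2.1,
       (l.map Prod.snd).foldl min st.2.2.1, (l.map Prod.snd).foldl max st.2.2.2) := by
  induction l with
  | nil => intro st; rfl
  | cons q l ih => intro st; simp [pvUpd, ih]

lemma foldl_min_comm (l : List Int) : ∀ (a b : Int),
    l.foldl min (min a b) = min a (l.foldl min b) := by
  induction l with
  | nil => intro a b; rfl
  | cons c l ih =>
    intro a b
    simp only [List.foldl_cons, min_assoc, ih]

lemma foldl_max_comm (l : List Int) : ∀ (a b : Int),
    l.foldl max (max a b) = max a (l.foldl max b) := by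
  induction l with
  | nil => intro a b; rfl
  | cons c l ih =>
    intro a b
    simp only [List.foldl_cons, max_assoc, ih]

lemma foldl_min_le (l : List Int) : ∀ (a : Int), l.foldl min a ≤ a := by
  induction l with
  | nil => intro a; simp
  | cons b l ih =>
    intro a
    calc (b :: l).foldl min a = l.foldl min (min a b) := rfl
      _ ≤ min a b := ih _
      _ ≤ a := min_le_left _ _

lemma le_foldl_max (l : List Int) : ∀ (a : Int), a ≤ l.foldl max a := by
  induction l with
  | nil => intro a; simp
  | cons b l ih =>
    intro a
    calc a ≤ max a b := le_max_left _ _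
      _ ≤ l.foldl max (max a b) := ih _
      _ = (b :: l).foldl max a := rfl

lemma foldl_min_nonneg (l : List Int) : ∀ (a : Int), 0 ≤ a → (∀ x ∈ l, 0 ≤ x) →
    0 ≤ l.foldl min a := by
  induction l with
  | nil => intro a ha _; simpa using ha
  | cons b l ih =>
    intro a ha hl
    have hb : 0 ≤ b := hl b (by simp)
    exact ih (min a b) (le_min ha hb) (fun x hx => hl x (by simp [hx]))

lemma pvBRow_mem (cs : List Char) : ∀ (y x : Int) (q : Int × Int),
    q ∈ pvBRow y x cs → x ≤ q.1 ∧ q.2 = y := by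
  induction cs with
  | nil => intro y x q h; simp [pvBRow] at h
  | cons c rest ih =>
    intro y x q h
    by_cases hc : c ≠ '~' ∧ c ≠ ' '
    · simp only [pvBRow, if_pos hc, List.mem_cons] at h
      rcases h with h | h
      · subst h; exact ⟨le_refl _, rfl⟩
      · have := ih y (x + 1) q h; exact ⟨by omega, this.2⟩
    · simp only [pvBRow, if_neg hc] at h
      have := ih y (x + 1) q h; exact ⟨by omega, this.2⟩

lemma pvBPts_mem (rows : List String) : ∀ (y : Int) (q : Int × Int),
    q ∈ pvBPts y rows → 0 ≤ q.1 ∧ y ≤ q.2 := by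
  induction rows with
  | nil => intro y q h; simp [pvBPts] at h
  | cons r rest ih =>
    intro y q h
    simp only [pvBPts, List.mem_append] at h
    rcases h with h | h
    · have := pvBRow_mem r.toList y 0 q h; exact ⟨this.1, le_of_eq this.2.symm⟩
    · have := ih (y + 1) q h; exact ⟨this.1, by omega⟩

lemma pvFmt_eq (m M my My : Int) (hm : 0 ≤ m) (hM : 0 ≤ M) (hmy : 0 ≤ my) (hMy : 0 ≤ My) :
    pvAFmt (min 999 m) (max 0 M) (min 999 my) (max 0 My) = pvBFmt m M my My := by
  unfold pvAFmt pvBFmt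
  have h1 : max 0 (min (min 999 m * 4) 255) = max 0 (min (m * 4) 255) := by omega
  have h2 : max 0 (min ((max 0 M + 1) * 4 - 1) 255) = max 0 (min ((M + 1) * 4 - 1) 255) := by omega
  have h3 : max 0 (min (min 999 my * 4) 255) = max 0 (min (my * 4) 255) := by omega
  have h4 : max 0 (min ((max 0 My + 1) * 4 - 1) 255) = max 0 (min ((My + 1) * 4 - 1) 255) := by omega
  simp only [h1, h2, h3, h4]

-- ===== VERDICT (by name: the statement is the Claim_ definition above) =====
theorem compute_buildable_area_spec : Claim_equal_compute_buildable_area := by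
  intro g _
  unfold Spec_compute_buildable_area compute_buildable_area compute_buildable_area_alt
  by_cases hg : g = []
  · subst hg; rfl
  · simp only [if_neg hg, pvARows_fold, pvUpd_components]
    cases hpts : pvBPts 0 g with
    | nil => simp
    | cons p ps =>
      have hmem : ∀ q ∈ pvBPts 0 g, 0 ≤ q.1 ∧ 0 ≤ q.2 := fun q hq => pvBPts_mem g 0 q hq
      rw [hpts] at hmem
      have hp := hmem p (by simp)
      have hxs : ∀ x ∈ ps.map Prod.fst, 0 ≤ x := by
        intro x hx
        rcases List.mem_map.mp hx with ⟨q, hq, rfl⟩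
        exact (hmem q (by simp [hq])).1
      have hys : ∀ x ∈ ps.map Prod.snd, 0 ≤ x := by
        intro x hx
        rcases List.mem_map.mp hx with ⟨q, hq, rfl⟩
        exact (hmem q (by simp [hq])).2
      have hm : 0 ≤ (ps.map Prod.fst).foldl min p.1 := foldl_min_nonneg _ _ hp.1 hxs
      have hmy : 0 ≤ (ps.map Prod.snd).foldl min p.2 := foldl_min_nonneg _ _ hp.2 hys
      have hM : 0 ≤ (ps.map Prod.fst).foldl max p.1 := le_trans hp.1 (le_foldl_max _ _)
      have hMy : 0 ≤ (ps.map Prod.snd).foldl max p.2 := le_trans hp.2 (le_foldl_max _ _)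
      -- A's components over p :: ps
      have e1 : ((p :: ps).map Prod.fst).foldl min 999
          = min 999 ((ps.map Prod.fst).foldl min p.1) := by
        simpa using foldl_min_comm (ps.map Prod.fst) 999 p.1
      have e2 : ((p :: ps).map Prod.fst).foldl max 0
          = max 0 ((ps.map Prod.fst).foldl max p.1) := by
        simpa using foldl_max_comm (ps.map Prod.fst) 0 p.1
      have e3 : ((p :: ps).map Prod.snd).foldl min 999
          = min 999 ((ps.map Prod.snd).foldl min p.2) := by
        simpa using foldl_min_comm (ps.map Prod.snd) 999 p.2
      have e4 : ((p :: ps).map Prod.snd).foldl max 0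
          = max 0 ((ps.map Prod.snd).foldl max p.2) := by
        simpa using foldl_max_comm (ps.map Prod.snd) 0 p.2
      have hle : (ps.map Prod.fst).foldl min p.1 ≤ (ps.map Prod.fst).foldl max p.1 :=
        le_trans (foldl_min_le _ _) (le_foldl_max _ _)
      have hguard : ¬ (min 999 ((ps.map Prod.fst).foldl min p.1)
          > max 0 ((ps.map Prod.fst).foldl max p.1)) := by omega
      simp only [e1, e2, e3, e4, if_neg hguard]
      exact pvFmt_eq _ _ _ _ hm hM hmy hMy
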